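-- pv_equiv track=rewrite | github.com/DaveGerson/agent-baton | agent_baton/cli/_override_helper.py | _derive_command
-- ===== SOURCE A (Python) =====
-- def _derive_command(argv: list[str]) -> str:
--     """Derive a logical command name like ``"baton execute gate"`` from argv."""
--     if not argv:
--         return "baton"
--     parts = ["baton"]
--     # Skip the executable path; collect non-flag positional tokens.
--     for token in argv[1:]:
--         if token.startswith("-"):
--             break
--         parts.append(token)
--         if len(parts) >= 4:
--             break
--     return " ".join(parts)
-- ===== SOURCE B (Python) =====
-- def _suffix(tokens: list[str], budget: int) -> str:
--     """Recursively append up to ``budget`` leading non-flag tokens, space-separated."""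
--     if not tokens or budget == 0 or tokens[0].startswith("-"):
--         return ""
--     return " " + tokens[0] + _suffix(tokens[1:], budget - 1)
--
--
-- def _derive_command(argv: list[str]) -> str:
--     """Derive a logical command name like ``"baton execute gate"`` from argv."""
--     if not argv:
--         return "baton"
--     return "baton" + _suffix(argv[1:], 3)
-- ===== Notes on version B (the rewrite author's own statement) =====
-- stated objective: alternative
-- what changed: B builds the result string directly by structural recursion with a budget counter (no parts list, no join): a recursive helper emits ' '+token per accepted token, whereas A accumulates a list in a loop with two break conditions and joins it at the end.
import Mathlib
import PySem

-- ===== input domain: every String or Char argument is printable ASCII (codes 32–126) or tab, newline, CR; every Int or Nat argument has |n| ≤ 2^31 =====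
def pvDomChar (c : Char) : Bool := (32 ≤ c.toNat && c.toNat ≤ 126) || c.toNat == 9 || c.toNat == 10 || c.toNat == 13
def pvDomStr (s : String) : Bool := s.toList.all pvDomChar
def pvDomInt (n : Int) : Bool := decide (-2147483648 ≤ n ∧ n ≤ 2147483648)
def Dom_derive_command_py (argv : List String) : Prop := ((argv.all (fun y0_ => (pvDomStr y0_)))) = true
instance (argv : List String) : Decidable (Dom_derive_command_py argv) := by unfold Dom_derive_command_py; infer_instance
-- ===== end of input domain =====

-- B builds the result string directly by structural recursion with a budget counter
-- (no parts list, no join), instead of A's accumulate-list-then-join loop; objective: alternative.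


-- ===== PORT A =====
-- loop of A: break on a flag token, break when parts reaches length 4
def deriveA_loop (parts : List String) : List String → List String
  | [] => parts
  | token :: rest =>
    if PySem.Str.startswith token "-" then parts
    else
      let parts' := parts ++ [token]
      if 4 ≤ parts'.length then parts' else deriveA_loop parts' rest

def derive_command_py (argv : List String) : String :=
  if argv = [] then "baton"
  else PySem.Str.join " " (deriveA_loop ["baton"] (PySem.List.slice argv (some 1) none))

-- ===== PORT B =====
-- recursive helper _suffix of Source B; string concatenation is exact over List Char
def deriveB_suffix : List String → Nat → List Char
  | _, 0 => []
  | [], _ => []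
  | token :: rest, b + 1 =>
    if PySem.Str.startswith token "-" then []
    else ' ' :: token.toList ++ deriveB_suffix rest b

def derive_command_py_alt (argv : List String) : String :=
  if argv = [] then "baton"
  else String.ofList ("baton".toList ++ deriveB_suffix (PySem.List.slice argv (some 1) none) 3)

-- ===== PRECONDITION & SPEC =====
def Spec_derive_command_py (argv : List String) (out : String) : Prop := out = derive_command_py_alt argv
instance (argv : List String) (out : String) : Decidable (Spec_derive_command_py argv out) := by unfold Spec_derive_command_py; infer_instance

-- ===== CLAIM =====
def Claim_equal_derive_command_py : Prop := ∀ (argv : List String), Dom_derive_command_py argv → Spec_derive_command_py argv (derive_command_py argv)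

-- ===== LEMMAS AND PROOFS =====
theorem deriveA_loop_eq (l : List String) : ∀ (parts : List String), parts.length < 4 →
    deriveA_loop parts l =
      parts ++ (l.takeWhile (fun t => !(PySem.Str.startswith t "-"))).take (4 - parts.length) := by
  induction l with
  | nil => intro parts _; simp [deriveA_loop]
  | cons t rest ih =>
    intro parts hlen
    by_cases hs : PySem.Chars.startswith t.toList ['-'] = true
    · simp [deriveA_loop, PySem.Str.startswith, hs]
    · by_cases h3 : 3 ≤ parts.length
      · have h1 : 4 - parts.length = 1 := by omega
        simp [deriveA_loop, PySem.Str.startswith, hs, h3, h1]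
      · have hlt : (parts ++ [t]).length < 4 := by simp; omega
        have h4 : 4 - parts.length = (4 - (parts.length + 1)) + 1 := by omega
        simp [deriveA_loop, PySem.Str.startswith, hs, h3, ih _ hlt, h4]

theorem deriveB_suffix_eq (l : List String) : ∀ (b : Nat),
    deriveB_suffix l b =
      ((l.takeWhile (fun t => !(PySem.Str.startswith t "-"))).take b).flatMap
        (fun t => ' ' :: t.toList) := by
  induction l with
  | nil => intro b; cases b <;> simp [deriveB_suffix]
  | cons t rest ih =>
    intro b
    cases b with
    | zero => simp [deriveB_suffix]
    | succ b =>
      by_cases hs : PySem.Chars.startswith t.toList ['-'] = true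
      · simp [deriveB_suffix, PySem.Str.startswith, hs]
      · simp [deriveB_suffix, PySem.Str.startswith, hs, ih b]

theorem join_space_eq (xs : List String) : ∀ (s : List Char),
    PySem.Chars.join " ".toList (s :: xs.map String.toList) =
      s ++ xs.flatMap (fun t => ' ' :: t.toList) := by
  induction xs with
  | nil => intro s; simp [PySem.Chars.join_singleton]
  | cons t rest ih =>
    intro s
    simp only [List.map_cons, PySem.Chars.join_cons_cons, List.flatMap_cons]
    rw [ih]
    simp

-- ===== VERDICT =====
theorem derive_command_py_spec : Claim_equal_derive_command_py := by
  intro argv _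
  unfold Spec_derive_command_py derive_command_py derive_command_py_alt
  by_cases h : argv = []
  · simp [h]
  · simp only [h, if_false]
    rw [deriveA_loop_eq _ ["baton"] (by simp), deriveB_suffix_eq]
    show PySem.Str.join " " ("baton" :: _) = _
    rw [PySem.Str.join]
    congr 1
    rw [List.map_cons, join_space_eq]
    simp
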